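-- pv_equiv track=rewrite | github.com/siddhanth78/YourMOM | YourMOMWin.py | check_dirs
-- ===== SOURCE A (Python) =====
-- def check_dirs(query, paths):
--     pathli = []
--     for p in paths:
--         if p.lower().startswith(query.lower()):
--             pathli.append(p)
--     others = [x for x in paths if x not in pathli and query.lower() in x.lower()]
--     pathli.extend(others)
--     return pathli
-- ===== SOURCE B (Python) =====
-- def check_dirs(query, paths):
--     q = query.lower()
--     prefix, others = [], []
--     for p in paths:
--         pl = p.lower()
--         if pl.startswith(q):
--             prefix.append(p)
--         elif q in pl:
--             others.append(p)
--     return prefix + others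
-- ===== Notes on version B (the rewrite author's own statement) =====
-- stated objective: faster
-- what changed: Single partitioning pass with two accumulators replaces A's prefix pass plus a second scan whose 'x not in pathli' test rescans the prefix list for every path; query.lower() is computed once.
import Mathlib
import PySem

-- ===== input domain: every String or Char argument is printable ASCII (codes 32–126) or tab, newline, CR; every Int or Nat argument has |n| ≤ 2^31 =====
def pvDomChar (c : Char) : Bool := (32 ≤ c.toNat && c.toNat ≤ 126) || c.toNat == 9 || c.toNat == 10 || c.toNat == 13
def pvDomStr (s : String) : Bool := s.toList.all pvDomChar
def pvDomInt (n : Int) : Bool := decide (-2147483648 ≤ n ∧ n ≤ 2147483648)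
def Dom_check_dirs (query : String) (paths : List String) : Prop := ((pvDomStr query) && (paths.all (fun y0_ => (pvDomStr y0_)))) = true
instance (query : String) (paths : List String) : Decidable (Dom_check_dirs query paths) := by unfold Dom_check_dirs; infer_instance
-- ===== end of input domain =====

-- ===== PORT A =====
-- B changes: one partitioning pass, query.lower() computed once (objective: faster; A rescans its prefix list per path)
def check_dirs (query : String) (paths : List String) : List String :=
  let pathli := paths.foldl (fun acc p =>
    if PySem.Str.startswith (PySem.Str.lower p) (PySem.Str.lower query) then acc ++ [p] else acc) []
  let others := paths.filter (fun x =>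
    !pathli.contains x && PySem.Str.isIn (PySem.Str.lower query) (PySem.Str.lower x))
  pathli ++ others

-- ===== PORT B =====
def check_dirs_alt (query : String) (paths : List String) : List String :=
  let q := PySem.Str.lower query
  let pr := paths.foldl (fun (acc : List String × List String) p =>
    let pl := PySem.Str.lower p
    if PySem.Str.startswith pl q then (acc.1 ++ [p], acc.2)
    else if PySem.Str.isIn q pl then (acc.1, acc.2 ++ [p])
    else acc) ([], [])
  pr.1 ++ pr.2

-- ===== PRECONDITION & SPEC =====
def Spec_check_dirs (query : String) (paths : List String) (out : List String) : Prop := out = check_dirs_alt query paths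
instance (query : String) (paths : List String) (out : List String) : Decidable (Spec_check_dirs query paths out) := by unfold Spec_check_dirs; infer_instance

-- ===== CLAIM (what is proved, stated in full; the proofs are below) =====
def Claim_equal_check_dirs : Prop := ∀ (query : String) (paths : List String), Dom_check_dirs query paths → Spec_check_dirs query paths (check_dirs query paths)

-- ===== LEMMAS AND PROOFS =====

-- A's first loop is accumulation of the prefix matches
theorem pvA_fold (q : String) (paths : List String) (acc : List String) :
    paths.foldl (fun acc p =>
      if PySem.Str.startswith (PySem.Str.lower p) (PySem.Str.lower q) then acc ++ [p] else acc) acc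
    = acc ++ paths.filter (fun p => PySem.Str.startswith (PySem.Str.lower p) (PySem.Str.lower q)) := by
  induction paths generalizing acc with
  | nil => simp
  | cons h t ih =>
    rw [List.foldl_cons, List.filter_cons, ih]
    by_cases hs : PySem.Str.startswith (PySem.Str.lower h) (PySem.Str.lower q) = true
    · rw [if_pos hs, if_pos hs]; simp
    · rw [if_neg hs, if_neg hs]

-- B's loop builds both partitions as filters
theorem pvB_fold (q : String) (paths : List String) (acc : List String × List String) :
    paths.foldl (fun (acc : List String × List String) p =>
      let pl := PySem.Str.lower p
      if PySem.Str.startswith pl q then (acc.1 ++ [p], acc.2)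
      else if PySem.Str.isIn q pl then (acc.1, acc.2 ++ [p])
      else acc) acc
    = (acc.1 ++ paths.filter (fun p => PySem.Str.startswith (PySem.Str.lower p) q),
       acc.2 ++ paths.filter (fun p => !PySem.Str.startswith (PySem.Str.lower p) q
                                        && PySem.Str.isIn q (PySem.Str.lower p))) := by
  induction paths generalizing acc with
  | nil => simp
  | cons h t ih =>
    rw [List.foldl_cons, List.filter_cons, List.filter_cons]
    show List.foldl _ (if PySem.Str.startswith (PySem.Str.lower h) q then (acc.1 ++ [h], acc.2)
      else if PySem.Str.isIn q (PySem.Str.lower h) then (acc.1, acc.2 ++ [h]) else acc) t = _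
    rw [ih]
    by_cases hs : PySem.Str.startswith (PySem.Str.lower h) q = true
    · rw [if_pos hs]; simp at hs; simp [hs]
    · rw [if_neg hs]
      by_cases hi : PySem.Str.isIn q (PySem.Str.lower h) = true
      · rw [if_pos hi]; simp at hs hi; simp [hs, hi]
      · rw [if_neg hi]; simp at hs hi; simp [hs, hi]

-- ===== VERDICT (by name: the statement is the Claim_ definition above) =====
theorem check_dirs_spec : Claim_equal_check_dirs := by
  intro query paths _
  unfold Spec_check_dirs check_dirs check_dirs_alt
  simp only [pvA_fold, pvB_fold, List.nil_append]
  congr 1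
  apply List.filter_congr
  intro x hx
  by_cases hs : PySem.Str.startswith (PySem.Str.lower x) (PySem.Str.lower query) = true
  · simp at hs; simp [List.mem_filter, hx, hs]
  · simp at hs; simp [List.mem_filter, hx, hs]
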